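-- pv_equiv track=rewrite | github.com/danhalligan/bioinformatics-stronghold | rosalind/alignment.py | mgap
-- ===== SOURCE A (Python) =====
-- from collections import defaultdict
--
-- def mgap(s1, s2):
--     """Maximizing the Gap Symbols of an Optimal Alignment"""
--     m = defaultdict(lambda: 0)
--
--     for j in range(len(s2)):
--         for i in range(len(s1)):
--             if s1[i] == s2[j]:
--                 m[j + 1, i + 1] = m[j, i] + 1
--             else:
--                 m[j + 1, i + 1] = max([m[j + 1, i], m[j, i + 1]])
--
--     return len(s1) + len(s2) - 2 * m[len(s2), len(s1)]
-- ===== SOURCE B (Python) =====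
-- def mgap(s1, s2):
--     """Maximizing the Gap Symbols of an Optimal Alignment"""
--     memo = {}
--
--     def lcs(i, j):
--         # longest common subsequence of s1[:i] and s2[:j], top-down with memoization
--         if (i, j) in memo:
--             return memo[i, j]
--         if i == 0 or j == 0:
--             r = 0
--         elif s1[i - 1] == s2[j - 1]:
--             r = lcs(i - 1, j - 1) + 1
--         else:
--             r = max(lcs(i - 1, j), lcs(i, j - 1))
--         memo[i, j] = r
--         return r
--
--     return len(s1) + len(s2) - 2 * lcs(len(s1), len(s2))
-- ===== Notes on version B (the rewrite author's own statement) =====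
-- stated objective: alternative
-- what changed: Replaces the bottom-up double loop filling a defaultdict table with demand-driven top-down memoized recursion on prefix lengths; the closing formula len(s1)+len(s2)-2*LCS is kept.
import Mathlib
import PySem

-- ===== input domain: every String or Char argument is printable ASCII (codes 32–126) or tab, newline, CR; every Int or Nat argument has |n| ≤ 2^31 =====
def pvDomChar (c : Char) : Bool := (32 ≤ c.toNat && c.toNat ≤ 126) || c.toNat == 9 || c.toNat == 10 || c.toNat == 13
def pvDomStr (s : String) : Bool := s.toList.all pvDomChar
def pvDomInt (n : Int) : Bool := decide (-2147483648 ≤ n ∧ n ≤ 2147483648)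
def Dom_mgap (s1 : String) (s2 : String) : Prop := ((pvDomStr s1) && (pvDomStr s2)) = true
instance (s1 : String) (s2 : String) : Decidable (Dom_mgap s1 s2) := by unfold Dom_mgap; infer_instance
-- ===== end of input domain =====

-- B replaces A's bottom-up defaultdict table fill by top-down memoized recursion on prefix
-- lengths (ported as plain structural recursion; the memo is a cache and does not change the
-- value); same O(n*m) asymptotics, different decomposition.

-- ===== PORT A =====
def mgapStep (s1 s2 : String) (j : Int) (m : PySem.Dict (Int × Int) Int) (i : Int) :
    PySem.Dict (Int × Int) Int :=
  if PySem.Str.pyGet? s1 i = PySem.Str.pyGet? s2 j then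
    m.insert (j + 1, i + 1) (m.getD (j, i) 0 + 1)
  else
    m.insert (j + 1, i + 1) (max (m.getD (j + 1, i) 0) (m.getD (j, i + 1) 0))

def mgapOuter (s1 s2 : String) (m : PySem.Dict (Int × Int) Int) (j : Int) :
    PySem.Dict (Int × Int) Int :=
  (PySem.List.pyRange 0 (PySem.Str.len s1) 1).foldl (mgapStep s1 s2 j) m

def mgap (s1 : String) (s2 : String) : Int :=
  let m := (PySem.List.pyRange 0 (PySem.Str.len s2) 1).foldl (mgapOuter s1 s2) PySem.Dict.empty
  PySem.Str.len s1 + PySem.Str.len s2 - 2 * m.getD (PySem.Str.len s2, PySem.Str.len s1) 0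

-- ===== PORT B =====
-- lcs(i, j) of Source B: LCS length of s1[:i] and s2[:j]; the memo dict only caches values, so the
-- port is the same recursion without the cache.
def lcsB (l1 l2 : List Char) : Nat → Nat → Int
  | 0, _ => 0
  | _ + 1, 0 => 0
  | i + 1, j + 1 =>
    if l1[i]? = l2[j]? then lcsB l1 l2 i j + 1
    else max (lcsB l1 l2 (i + 1) j) (lcsB l1 l2 i (j + 1))
  termination_by i j => (i, j)

def mgap_alt (s1 : String) (s2 : String) : Int :=
  let l1 := s1.toList
  let l2 := s2.toList
  (l1.length : Int) + l2.length - 2 * lcsB l1 l2 l1.length l2.length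

-- ===== PRECONDITION & SPEC =====
def Spec_mgap (s1 : String) (s2 : String) (out : Int) : Prop := out = mgap_alt s1 s2
instance (s1 : String) (s2 : String) (out : Int) : Decidable (Spec_mgap s1 s2 out) := by
  unfold Spec_mgap; infer_instance

-- ===== CLAIM (what is proved, stated in full; the proofs are below) =====
def Claim_equal_mgap : Prop := ∀ (s1 : String) (s2 : String), Dom_mgap s1 s2 → Spec_mgap s1 s2 (mgap s1 s2)

-- ===== LEMMAS AND PROOFS =====

theorem lcsB_left_zero (l1 l2 : List Char) (j : Nat) : lcsB l1 l2 0 j = 0 := by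
  cases j <;> simp [lcsB]

theorem lcsB_right_zero (l1 l2 : List Char) (i : Nat) : lcsB l1 l2 i 0 = 0 := by
  cases i <;> simp [lcsB]

-- the value A's defaultdict holds at key (a, b) after j full outer rows and i inner steps of row j
def tbl (l1 l2 : List Char) (j i : Nat) (a b : Int) : Int :=
  if (1 ≤ a ∧ a ≤ (j : Int) ∧ 1 ≤ b ∧ b ≤ (l1.length : Int)) ∨
     (a = (j : Int) + 1 ∧ 1 ≤ b ∧ b ≤ (i : Int)) then
    lcsB l1 l2 b.toNat a.toNat
  else 0

theorem tbl_diag (l1 l2 : List Char) (j i : Nat) (hi : i ≤ l1.length) :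
    tbl l1 l2 j i (j : Int) (i : Int) = lcsB l1 l2 i j := by
  unfold tbl
  rcases Nat.eq_zero_or_pos i with hi0 | hi0
  · subst hi0
    rw [if_neg (by omega)]
    exact (lcsB_left_zero l1 l2 j).symm
  · rcases Nat.eq_zero_or_pos j with hj0 | hj0
    · subst hj0
      rw [if_neg (by omega)]
      exact (lcsB_right_zero l1 l2 i).symm
    · rw [if_pos (by left; omega)]
      simp

theorem step_inv (s1 s2 : String) (j i : Nat)
    (hi : i < s1.toList.length) (hj : j < s2.toList.length)
    (m : PySem.Dict (Int × Int) Int)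
    (hm : ∀ a b : Int, m.getD (a, b) 0 = tbl s1.toList s2.toList j i a b) :
    ∀ a b : Int, (mgapStep s1 s2 (j : Int) m (i : Int)).getD (a, b) 0 =
      tbl s1.toList s2.toList j (i + 1) a b := by
  intro a b
  set l1 := s1.toList with hl1
  set l2 := s2.toList with hl2
  have hcond : (PySem.Str.pyGet? s1 (i : Int) = PySem.Str.pyGet? s2 (j : Int)) ↔ (l1[i]? = l2[j]?) := by
    simp only [PySem.Str.pyGet?_natCast, ← hl1, ← hl2]
  by_cases hab : (a, b) = ((j : Int) + 1, (i : Int) + 1)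
  · -- freshly written cell: its value is lcsB (i+1) (j+1)
    obtain ⟨ha, hb⟩ : a = (j : Int) + 1 ∧ b = (i : Int) + 1 := Prod.mk.injEq .. ▸ hab
    have htarget : tbl l1 l2 j (i + 1) a b = lcsB l1 l2 (i + 1) (j + 1) := by
      unfold tbl
      rw [if_pos (by right; omega)]
      have : b.toNat = i + 1 := by omega
      have ha' : a.toNat = j + 1 := by omega
      rw [this, ha']
    rw [htarget]
    unfold mgapStep
    by_cases hc : PySem.Str.pyGet? s1 (i : Int) = PySem.Str.pyGet? s2 (j : Int)
    · rw [if_pos hc, PySem.Dict.getD_insert, if_pos hab, hm]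
      have := tbl_diag l1 l2 j i (by omega)
      rw [this]
      show lcsB l1 l2 i j + 1 = lcsB l1 l2 (i + 1) (j + 1)
      rw [lcsB, if_pos (hcond.mp hc)]
    · rw [if_neg hc, PySem.Dict.getD_insert, if_pos hab, hm, hm]
      have h1 : tbl l1 l2 j i ((j : Int) + 1) (i : Int) = lcsB l1 l2 i (j + 1) := by
        unfold tbl
        rcases Nat.eq_zero_or_pos i with hi0 | hi0
        · subst hi0; rw [if_neg (by omega)]
          exact (lcsB_left_zero l1 l2 (j + 1)).symm
        · rw [if_pos (by right; omega)]
          have e1 : ((j : Int) + 1).toNat = j + 1 := by omega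
          have e2 : ((i : Nat) : Int).toNat = i := by omega
          rw [e1, e2]
      have h2 : tbl l1 l2 j i (j : Int) ((i : Int) + 1) = lcsB l1 l2 (i + 1) j := by
        unfold tbl
        rcases Nat.eq_zero_or_pos j with hj0 | hj0
        · subst hj0; rw [if_neg (by omega)]
          exact (lcsB_right_zero l1 l2 (i + 1)).symm
        · rw [if_pos (by left; omega)]
          have e1 : ((i : Int) + 1).toNat = i + 1 := by omega
          have e2 : ((j : Nat) : Int).toNat = j := by omega
          rw [e1, e2]
      rw [h1, h2]
      show max (lcsB l1 l2 i (j + 1)) (lcsB l1 l2 (i + 1) j) = lcsB l1 l2 (i + 1) (j + 1)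
      rw [lcsB, if_neg (fun h => hc (hcond.mpr h)), max_comm]
  · -- untouched cell: old table value, and the i → i+1 condition is unchanged off (j+1, i+1)
    have hne : ¬(a = (j : Int) + 1 ∧ b = (i : Int) + 1) :=
      fun h => hab (by rw [h.1, h.2])
    have hiff : ((1 ≤ a ∧ a ≤ (j : Int) ∧ 1 ≤ b ∧ b ≤ (l1.length : Int)) ∨
        (a = (j : Int) + 1 ∧ 1 ≤ b ∧ b ≤ (i : Int))) ↔
        ((1 ≤ a ∧ a ≤ (j : Int) ∧ 1 ≤ b ∧ b ≤ (l1.length : Int)) ∨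
        (a = (j : Int) + 1 ∧ 1 ≤ b ∧ b ≤ ((i + 1 : Nat) : Int))) := by omega
    have hsame : tbl l1 l2 j i a b = tbl l1 l2 j (i + 1) a b := by
      unfold tbl
      rw [if_congr hiff rfl rfl]
    rw [← hsame, ← hm a b]
    unfold mgapStep
    by_cases hc : PySem.Str.pyGet? s1 (i : Int) = PySem.Str.pyGet? s2 (j : Int)
    · rw [if_pos hc, PySem.Dict.getD_insert, if_neg hab]
    · rw [if_neg hc, PySem.Dict.getD_insert, if_neg hab]

theorem inner_inv (s1 s2 : String) (j : Nat) (hj : j < s2.toList.length) :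
    ∀ (k : Nat), k ≤ s1.toList.length →
    ∀ m : PySem.Dict (Int × Int) Int,
      (∀ a b : Int, m.getD (a, b) 0 = tbl s1.toList s2.toList j 0 a b) →
    ∀ a b : Int,
      ((PySem.List.pyRange 0 (k : Int) 1).foldl (mgapStep s1 s2 (j : Int)) m).getD (a, b) 0 =
        tbl s1.toList s2.toList j k a b := by
  intro k
  induction k with
  | zero =>
    intro _ m hm a b
    rw [PySem.List.pyRange_one_eq_nil (by omega)]
    exact hm a b
  | succ k ih =>
    intro hk m hm a b
    have hsplit : PySem.List.pyRange 0 ((k + 1 : Nat) : Int) 1 =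
        PySem.List.pyRange 0 (k : Int) 1 ++ [(k : Int)] := by
      have : ((k + 1 : Nat) : Int) = (k : Int) + 1 := by omega
      rw [this, PySem.List.pyRange_one_succ_right (by omega)]
    rw [hsplit, List.foldl_append]
    simp only [List.foldl_cons, List.foldl_nil]
    exact step_inv s1 s2 j k (by omega) hj _ (ih (by omega) m hm) a b

theorem outer_inv (s1 s2 : String) :
    ∀ (t : Nat), t ≤ s2.toList.length →
    ∀ a b : Int,
      ((PySem.List.pyRange 0 (t : Int) 1).foldl (mgapOuter s1 s2) PySem.Dict.empty).getD (a, b) 0 =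
        tbl s1.toList s2.toList t 0 a b := by
  intro t
  induction t with
  | zero =>
    intro _ a b
    rw [PySem.List.pyRange_one_eq_nil (by omega)]
    simp only [List.foldl_nil, PySem.Dict.getD_empty]
    unfold tbl
    rw [if_neg (by omega)]
  | succ t ih =>
    intro ht a b
    have hsplit : PySem.List.pyRange 0 ((t + 1 : Nat) : Int) 1 =
        PySem.List.pyRange 0 (t : Int) 1 ++ [(t : Int)] := by
      have : ((t + 1 : Nat) : Int) = (t : Int) + 1 := by omega
      rw [this, PySem.List.pyRange_one_succ_right (by omega)]
    rw [hsplit, List.foldl_append]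
    simp only [List.foldl_cons, List.foldl_nil]
    have hshift : ∀ a b : Int,
        tbl s1.toList s2.toList t s1.toList.length a b = tbl s1.toList s2.toList (t + 1) 0 a b := by
      intro a b
      unfold tbl
      split_ifs with h1 h2
      · rfl
      · exfalso; omega
      · exfalso; omega
      · rfl
    exact (inner_inv s1 s2 t (by omega) s1.toList.length le_rfl _
      (fun a b => ih (by omega) a b) a b).trans (hshift a b)

-- ===== VERDICT (by name: the statement is the Claim_ definition above) =====
theorem mgap_spec : Claim_equal_mgap := by
  intro s1 s2 _
  unfold Spec_mgap
  have hlen1 : PySem.Str.len s1 = ((s1.toList.length : Nat) : Int) := by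
    simp [PySem.Str.len_eq]
  have hlen2 : PySem.Str.len s2 = ((s2.toList.length : Nat) : Int) := by
    simp [PySem.Str.len_eq]
  have hfinal : tbl s1.toList s2.toList s2.toList.length 0
      ((s2.toList.length : Nat) : Int) ((s1.toList.length : Nat) : Int) =
      lcsB s1.toList s2.toList s1.toList.length s2.toList.length := by
    unfold tbl
    rcases Nat.eq_zero_or_pos s1.toList.length with h1 | h1
    · rw [if_neg (by omega), h1]
      exact (lcsB_left_zero s1.toList s2.toList s2.toList.length).symm
    · rcases Nat.eq_zero_or_pos s2.toList.length with h2 | h2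
      · rw [if_neg (by omega), h2]
        exact (lcsB_right_zero s1.toList s2.toList s1.toList.length).symm
      · rw [if_pos (by left; omega)]
        simp
  have key : (List.foldl (mgapOuter s1 s2) PySem.Dict.empty
        (PySem.List.pyRange 0 (PySem.Str.len s2) 1)).getD
        (PySem.Str.len s2, PySem.Str.len s1) 0 =
      lcsB s1.toList s2.toList s1.toList.length s2.toList.length := by
    rw [hlen1, hlen2]
    rw [outer_inv s1 s2 s2.toList.length le_rfl]
    exact hfinal
  simp only [mgap, mgap_alt]
  rw [key, hlen1, hlen2]
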